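-- pv_equiv track=rewrite | github.com/PedroMion/T-picos-Especiais-em-Programa-o | aula13/a1.py | solve
-- ===== SOURCE A (Python) =====
-- def solve(arr, n):
--     arr.sort(reverse=True)
--
--     for i in range(n, 0, -1):
--         found = False
--         for j in range(len(arr)):
--             y = arr[j]
--             while y > 0 and y != i:
--                 y //= 2
--             if y == i:
--                 arr[j] = 0
--                 found = True
--                 break
--         if not found:
--             return False
--     return True
-- ===== SOURCE B (Python) =====
-- def covers(i, y):
--     # does the halving chain of y pass through i (i >= 1)?
--     while y > i:
--         y //= 2
--     return y == i
--
--
-- def solve(arr, n):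
--     cnt = {}
--     for y in arr:
--         cnt[y] = cnt.get(y, 0) + 1
--     for i in range(n, 0, -1):
--         best = None
--         for y, c in cnt.items():
--             if c > 0 and covers(i, y) and (best is None or y > best):
--                 best = y
--         if best is None:
--             return False
--         cnt[best] -= 1
--     return True
-- ===== Notes on version B (the rewrite author's own statement) =====
-- stated objective: alternative
-- what changed: B replaces A's sort-then-rescan-and-zero greedy (halving each candidate to 0) with a sort-free value counter: per target it takes the maximum still-available value whose binary halving chain passes through the target (a prefix test 'halve while y > i'), decrementing its count.
import Mathlib
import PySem

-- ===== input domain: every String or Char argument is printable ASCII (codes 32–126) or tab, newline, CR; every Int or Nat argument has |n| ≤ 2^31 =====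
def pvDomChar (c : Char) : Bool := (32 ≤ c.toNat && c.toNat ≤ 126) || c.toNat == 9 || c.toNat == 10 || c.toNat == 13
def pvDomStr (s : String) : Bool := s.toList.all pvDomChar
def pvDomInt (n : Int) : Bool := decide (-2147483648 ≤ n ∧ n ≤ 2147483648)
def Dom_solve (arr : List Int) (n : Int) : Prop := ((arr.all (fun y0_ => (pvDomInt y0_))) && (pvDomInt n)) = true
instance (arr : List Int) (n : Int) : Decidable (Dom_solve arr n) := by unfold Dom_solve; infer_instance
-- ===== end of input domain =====

-- B replaces A's sort-then-rescan-and-zero greedy with a sort-free value counter taking the maximum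
-- available value whose halving chain hits the target; A sorts/zeroes `arr` in place (B does not mutate),
-- so the equivalence proved here is about the return value only.

-- ===== PORT A =====
-- the inner 'while y > 0 and y != i: y //= 2' of A
def pvChain (i y : Int) : Int :=
  if 0 < y ∧ y ≠ i then pvChain i (PySem.Int.floordiv y 2) else y
termination_by y.natAbs
decreasing_by
  rename_i h
  rw [PySem.Int.floordiv_eq_ediv_of_pos (by norm_num)]
  omega

-- the inner 'for j in range(len(arr))' with its break: first index whose chain reaches i
def pvScanA (arr : List Int) (i : Int) (j : Nat) : Option Nat :=
  if h : j < arr.length then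
    if pvChain i arr[j] = i then some j else pvScanA arr i (j + 1)
  else none
termination_by arr.length - j

-- the outer 'for i in range(n, 0, -1)' (a lazy countdown) with its early 'return False'
def pvLoopA (arr : List Int) (i : Int) : Bool :=
  if 0 < i then
    match pvScanA arr i 0 with
    | some j => pvLoopA (arr.set j 0) (i - 1)
    | none => false
  else true
termination_by i.toNat
decreasing_by omega

def solve (arr : List Int) (n : Int) : Bool :=
  pvLoopA (PySem.List.sorted arr (fun x => x) true) n

-- ===== PORT B =====
-- Source B's 'covers': while y > i: y //= 2; return y == i.  The extra '0 < y' conjunct only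
-- totalizes the recursion; at every call site i ≥ 1, where y > i already implies y > 0.
def pvCovers (i y : Int) : Bool :=
  if i < y ∧ 0 < y then pvCovers i (PySem.Int.floordiv y 2) else decide (y = i)
termination_by y.natAbs
decreasing_by
  rename_i h
  rw [PySem.Int.floordiv_eq_ediv_of_pos (by norm_num)]
  omega

-- Source B's inner 'for y, c in cnt.items(): if c > 0 and covers(i, y) and (best is None or y > best): best = y'
def pvBest (i : Int) (items : List (Int × Int)) (best : Option Int) : Option Int :=
  match items with
  | [] => best
  | (y, c) :: rest =>
    if (decide (0 < c) && pvCovers i y && (match best with | none => true | some b => decide (b < y)))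
    then pvBest i rest (some y) else pvBest i rest best

-- Source B's outer loop (countdown over range(n, 0, -1)): take the best, decrement its count
def pvLoopB (cnt : PySem.Dict Int Int) (i : Int) : Bool :=
  if 0 < i then
    match pvBest i cnt.items none with
    | none => false
    | some v => pvLoopB (cnt.insert v (cnt.getD v 0 - 1)) (i - 1)
  else true
termination_by i.toNat
decreasing_by omega

def solve_alt (arr : List Int) (n : Int) : Bool :=
  pvLoopB (arr.foldl (fun d y => d.insert y (d.getD y 0 + 1)) PySem.Dict.empty) n

-- ===== PRECONDITION & SPEC =====
def Spec_solve (arr : List Int) (n : Int) (out : Bool) : Prop := out = solve_alt arr n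
instance (arr : List Int) (n : Int) (out : Bool) : Decidable (Spec_solve arr n out) := by unfold Spec_solve; infer_instance

-- ===== CLAIM (what is proved, stated in full; the proofs are below) =====
def Claim_equal_solve : Prop := ∀ (arr : List Int) (n : Int), Dom_solve arr n → Spec_solve arr n (solve arr n)

-- ===== LEMMAS AND PROOFS =====

-- A's array stays 'descending except where a slot was zeroed'
def SortZ (arr : List Int) : Prop :=
  ∀ j k : Nat, (hjk : j < k) → (hk : k < arr.length) →
    arr[k] ≤ arr[j]'(Nat.lt_trans hjk hk) ∨ arr[j]'(Nat.lt_trans hjk hk) = 0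

lemma covers_imp_le (i y : Int) (h : pvCovers i y = true) : i ≤ y := by
  rw [pvCovers] at h
  split at h
  · omega
  · simp at h; omega

lemma chain_small (i y : Int) (h0 : 0 ≤ y) (h1 : y < i) : pvChain i y ≠ i := by
  fun_induction pvChain i y with
  | case1 y hc ih =>
    apply ih
    · rw [PySem.Int.floordiv_eq_ediv_of_pos (by norm_num)]; omega
    · rw [PySem.Int.floordiv_eq_ediv_of_pos (by norm_num)]; omega
  | case2 y hc => omega

lemma chain_eq_covers (i : Int) (hi : 1 ≤ i) (y : Int) : pvChain i y = i ↔ pvCovers i y = true := by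
  fun_induction pvCovers i y with
  | case1 y hc ih =>
    rw [pvChain, if_pos ⟨hc.2, by omega⟩]
    exact ih
  | case2 y hc =>
    simp only [decide_eq_true_eq]
    constructor
    · intro h
      by_contra hne
      rcases (not_and_or.1 hc) with h1 | h2
      · by_cases hy : 0 ≤ y
        · exact chain_small i y hy (by omega) h
        · rw [pvChain, if_neg (by omega)] at h; omega
      · rw [pvChain, if_neg (by omega)] at h; omega
    · intro h; rw [pvChain, if_neg (by simp [h])]; exact h

lemma scan_none (arr : List Int) (i : Int) (j : Nat) (h : pvScanA arr i j = none) :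
    ∀ m, j ≤ m → (hm : m < arr.length) → pvChain i arr[m] ≠ i := by
  fun_induction pvScanA arr i j with
  | case1 j hj hc => simp at h
  | case2 j hj hc ih =>
    intro m hm hml
    rcases Nat.eq_or_lt_of_le hm with rfl | hlt
    · exact hc
    · exact ih h m hlt hml
  | case3 j hj =>
    intro m hm hml; omega

lemma scan_some (arr : List Int) (i : Int) (j k : Nat) (h : pvScanA arr i j = some k) :
    j ≤ k ∧ ∃ hk : k < arr.length, pvChain i arr[k] = i ∧
      ∀ m, j ≤ m → m < k → (hm : m < arr.length) → pvChain i arr[m] ≠ i := by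
  fun_induction pvScanA arr i j with
  | case1 j hj hc =>
    simp only [Option.some.injEq] at h
    subst h
    exact ⟨le_refl _, hj, hc, fun m h1 h2 _ => by omega⟩
  | case2 j hj hc ih =>
    obtain ⟨h1, hk, h2, h3⟩ := ih h
    refine ⟨by omega, hk, h2, ?_⟩
    intro m hm hmk hml
    rcases Nat.eq_or_lt_of_le hm with rfl | hlt
    · exact hc
    · exact h3 m hlt hmk hml
  | case3 j hj => simp at h

lemma best_cond_iff (i y c : Int) (best : Option Int) :
    (decide (0 < c) && pvCovers i y && (match best with | none => true | some b => decide (b < y))) = true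
    ↔ 0 < c ∧ pvCovers i y = true ∧ (∀ b, best = some b → b < y) := by
  cases best
  · simp
  · simp; tauto

lemma best_spec (i : Int) : ∀ (items : List (Int × Int)) (best : Option Int),
    (pvBest i items best = none →
      best = none ∧ ∀ p ∈ items, ¬(0 < p.2 ∧ pvCovers i p.1 = true)) ∧
    (∀ v, pvBest i items best = some v →
      (best = some v ∨ ∃ c, (v, c) ∈ items ∧ 0 < c ∧ pvCovers i v = true) ∧
      (∀ p ∈ items, 0 < p.2 → pvCovers i p.1 = true → p.1 ≤ v) ∧
      (∀ b, best = some b → b ≤ v)) := by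
  intro items
  induction items with
  | nil =>
    intro best
    refine ⟨fun h => ⟨h, by simp⟩, fun v h => ⟨Or.inl h, by simp,
      fun b hb => le_of_eq (by rw [hb] at h; exact (Option.some.inj h)) ⟩⟩
  | cons p rest ih =>
    obtain ⟨y, c⟩ := p
    intro best
    by_cases hcond : (decide (0 < c) && pvCovers i y && (match best with | none => true | some b => decide (b < y))) = true
    · rw [best_cond_iff] at hcond
      obtain ⟨hc, hcov, hbl0⟩ := hcond
      have hstep : pvBest i ((y, c) :: rest) best = pvBest i rest (some y) := by
        rw [pvBest.eq_def]
        simp only [best_cond_iff]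
        rw [if_pos ⟨hc, hcov, hbl0⟩]
      rw [hstep]
      constructor
      · intro h
        obtain ⟨hn, _⟩ := (ih (some y)).1 h
        exact absurd hn (by simp)
      · intro v h
        obtain ⟨hmem, hub, hbl⟩ := (ih (some y)).2 v h
        have hyv : y ≤ v := hbl y rfl
        refine ⟨?_, ?_, ?_⟩
        · right
          rcases hmem with heq | ⟨c', hc', h1, h2⟩
          · have : y = v := Option.some.inj heq
            subst this
            exact ⟨c, List.mem_cons_self .., hc, hcov⟩
          · exact ⟨c', List.mem_cons_of_mem _ hc', h1, h2⟩
        · intro p hp h1 h2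
          rcases List.mem_cons.1 hp with rfl | hp'
          · exact hyv
          · exact hub p hp' h1 h2
        · intro b hb'
          have : b < y := hbl0 b hb'
          omega
    · have hstep : pvBest i ((y, c) :: rest) best = pvBest i rest best := by
        rw [pvBest.eq_def]
        simp only []
        rw [if_neg (by exact fun hh => hcond hh)]
      rw [hstep]
      rw [best_cond_iff, not_and_or, not_and_or] at hcond
      constructor
      · intro h
        obtain ⟨hn, hall⟩ := (ih best).1 h
        subst hn
        refine ⟨rfl, ?_⟩
        intro p hp
        rcases List.mem_cons.1 hp with rfl | hp'
        · intro ⟨h1, h2⟩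
          rcases hcond with h' | h' | h'
          · exact h' h1
          · exact h' h2
          · exact absurd (fun b hb => by simp at hb) h'
        · exact hall p hp'
      · intro v h
        obtain ⟨hmem, hub, hbl⟩ := (ih best).2 v h
        refine ⟨?_, ?_, hbl⟩
        · rcases hmem with heq | ⟨c', hc', h1, h2⟩
          · exact Or.inl heq
          · exact Or.inr ⟨c', List.mem_cons_of_mem _ hc', h1, h2⟩
        · intro p hp h1 h2
          rcases List.mem_cons.1 hp with rfl | hp'
          · rcases hcond with h' | h' | h'
            · exact absurd h1 h'
            · exact absurd h2 h'
            · push Not at h'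
              obtain ⟨b, hb, hby⟩ := h'
              have : b ≤ v := hbl b hb
              omega
          · exact hub p hp' h1 h2

lemma count_set_eq (arr : List Int) : ∀ (j : Nat) (hj : j < arr.length) (v : Int), v ≠ 0 →
    (arr.set j 0).count v = arr.count v - (if v = arr[j] then 1 else 0) ∧
    (v = arr[j] → 1 ≤ arr.count v) := by
  induction arr with
  | nil => intro j hj; simp at hj
  | cons a t ih =>
    intro j hj v hv
    cases j with
    | zero =>
      simp only [List.set_cons_zero, List.getElem_cons_zero, List.count_cons]
      constructor
      · by_cases h : v = a
        · subst h; simp [Ne.symm hv]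
        · have h' : a ≠ v := fun hh => h hh.symm
          simp [h, h', Ne.symm hv]
      · intro h; subst h; simp
    | succ j' =>
      simp only [List.set_cons_succ, List.getElem_cons_succ, List.count_cons]
      have hj' : j' < t.length := by simpa using hj
      obtain ⟨h1, h2⟩ := ih j' hj' v hv
      constructor
      · rw [h1]
        by_cases h : v = t[j']
        · have h3 := h2 h
          split_ifs <;> omega
        · split_ifs <;> omega
      · intro h
        have h3 := h2 h
        split_ifs <;> omega

lemma sortz_set (arr : List Int) (j : Nat) (hj : j < arr.length) (hv : 1 ≤ arr[j]) (h : SortZ arr) :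
    SortZ (arr.set j 0) := by
  intro p q hpq hq
  have hq' : q < arr.length := by simpa using hq
  have hp' : p < arr.length := Nat.lt_trans hpq hq'
  rw [List.getElem_set, List.getElem_set]
  by_cases hjp : j = p
  · subst hjp; simp
  · rw [if_neg hjp]
    by_cases hjq : j = q
    · rw [if_pos hjq]
      rcases h p q hpq hq' with h' | h'
      · subst hjq
        left; omega
      · exact Or.inr h'
    · rw [if_neg hjq]
      exact h p q hpq hq'

lemma loop_eq (N : Nat) : ∀ (i : Int), i.toNat = N → ∀ (arr : List Int) (cnt : PySem.Dict Int Int),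
    SortZ arr → cnt.keys.Nodup →
    (∀ v : Int, 1 ≤ v → cnt.getD v 0 = (arr.count v : Int)) →
    pvLoopA arr i = pvLoopB cnt i := by
  induction N using Nat.strong_induction_on with
  | _ N IH =>
    intro i hNi arr cnt hS hN hC
    rw [pvLoopA, pvLoopB]
    by_cases hpos : 0 < i
    · rw [if_pos hpos, if_pos hpos]
      have hi : 1 ≤ i := hpos
      -- a value qualifies on the B side iff it is a present value that covers i
      have hiff : ∀ y : Int, (∃ c, (y, c) ∈ cnt.items ∧ 0 < c ∧ pvCovers i y = true)
          ↔ (y ∈ arr ∧ pvCovers i y = true) := by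
        intro y
        constructor
        · rintro ⟨c, hmem, hc, hcov⟩
          have hy1 : 1 ≤ y := le_trans hi (covers_imp_le i y hcov)
          have := PySem.Dict.getD_of_mem_items cnt hmem hN 0
          have hcnt : (0:Int) < (arr.count y : Int) := by rw [← hC y hy1, this]; exact hc
          exact ⟨List.count_pos_iff.1 (by exact_mod_cast hcnt), hcov⟩
        · rintro ⟨hmem, hcov⟩
          have hy1 : 1 ≤ y := le_trans hi (covers_imp_le i y hcov)
          have hpos' : (0:Int) < cnt.getD y 0 := by
            rw [hC y hy1]
            exact_mod_cast List.count_pos_iff.2 hmem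
          cases hg : cnt.get? y with
          | none =>
            rw [PySem.Dict.getD_eq_get?_getD, hg] at hpos'
            simp at hpos'
          | some c =>
            refine ⟨c, PySem.Dict.mem_items_of_get?_eq_some cnt hg, ?_, hcov⟩
            rw [PySem.Dict.getD_eq_get?_getD, hg] at hpos'
            exact hpos'
      cases hA : pvScanA arr i 0 with
      | none =>
        have hno : ∀ y ∈ arr, pvCovers i y ≠ true := by
          intro y hy hcov
          obtain ⟨m, hm, rfl⟩ := List.mem_iff_getElem.1 hy
          exact scan_none arr i 0 hA m (Nat.zero_le m) hm ((chain_eq_covers i hi _).2 hcov)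
        cases hB : pvBest i cnt.items none with
        | none => rfl
        | some v =>
          exfalso
          obtain ⟨hmem, -, -⟩ := (best_spec i cnt.items none).2 v hB
          rcases hmem with h' | h'
          · simp at h'
          · obtain ⟨hvm, hvcov⟩ := (hiff v).1 h'
            exact hno v hvm hvcov
      | some k =>
        obtain ⟨-, hk, hchain, hmin⟩ := scan_some arr i 0 k hA
        have hcov : pvCovers i arr[k] = true := (chain_eq_covers i hi _).1 hchain
        have hv1 : 1 ≤ arr[k] := le_trans hi (covers_imp_le _ _ hcov)
        have hvmem : arr[k] ∈ arr := List.getElem_mem hk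
        have hub : ∀ y ∈ arr, pvCovers i y = true → y ≤ arr[k] := by
          intro y hy hycov
          obtain ⟨m, hm, rfl⟩ := List.mem_iff_getElem.1 hy
          rcases Nat.lt_trichotomy m k with hlt | rfl | hgt
          · exact absurd ((chain_eq_covers i hi _).2 hycov) (hmin m (Nat.zero_le m) hlt hm)
          · exact le_refl _
          · rcases hS k m hgt hm with h' | h'
            · exact h'
            · omega
        cases hB : pvBest i cnt.items none with
        | none =>
          exfalso
          obtain ⟨-, hall⟩ := (best_spec i cnt.items none).1 hB
          obtain ⟨c, hcm, hc, hcv⟩ := (hiff arr[k]).2 ⟨hvmem, hcov⟩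
          exact hall (arr[k], c) hcm ⟨hc, hcv⟩
        | some w =>
          obtain ⟨hmem, hub2, -⟩ := (best_spec i cnt.items none).2 w hB
          have hw : w = arr[k] := by
            have h1 : w ≤ arr[k] := by
              rcases hmem with h' | h'
              · simp at h'
              · obtain ⟨hwm, hwcov⟩ := (hiff w).1 h'
                exact hub w hwm hwcov
            have h2 : arr[k] ≤ w := by
              obtain ⟨c, hcm, hc, hcv⟩ := (hiff arr[k]).2 ⟨hvmem, hcov⟩
              exact hub2 (arr[k], c) hcm hc hcv
            omega
          rw [hw]
          apply IH (i - 1).toNat (by omega) (i - 1) rfl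
          · exact sortz_set arr k hk hv1 hS
          · exact PySem.Dict.nodup_keys_insert cnt _ _ hN
          · intro u hu
            rw [PySem.Dict.getD_insert cnt _ u _ 0]
            obtain ⟨hc1, hc2⟩ := count_set_eq arr k hk u (by omega)
            by_cases huw : u = arr[k]
            · rw [if_pos huw]
              subst huw
              rw [hC _ hv1, hc1, if_pos rfl]
              have := hc2 rfl
              omega
            · rw [if_neg huw, hC u hu, hc1, if_neg huw]
              omega
    · rw [if_neg hpos, if_neg hpos]

lemma sortz_init (arr : List Int) : SortZ (PySem.List.sorted arr (fun x => x) true) := by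
  have hp := PySem.List.sorted_pairwise_rev (xs := arr) (key := fun x => x)
  rw [List.pairwise_iff_getElem] at hp
  intro j k hjk hk
  exact Or.inl (hp j k (Nat.lt_trans hjk hk) hk hjk)

-- ===== VERDICT (by name: the statement is the Claim_ definition above) =====
theorem solve_spec : Claim_equal_solve := by
  intro arr n _
  unfold Spec_solve solve solve_alt
  rw [PySem.Dict.foldl_insert_getD_add_one_eq_counter]
  apply loop_eq n.toNat n rfl
  · exact sortz_init arr
  · exact PySem.Dict.nodup_keys_counter arr
  · intro v _
    rw [PySem.Dict.getD_counter]
    exact congrArg _ ((PySem.List.sorted_perm arr (fun x => x) true).count_eq v).symm
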